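-- pv_equiv track=rewrite | github.com/PontusWehlin/DD1331 | L3/Ovanligaord.v.3.py | ordsortering
-- ===== SOURCE A (Python) =====
-- def ordsortering(orden, vanligaorden):    #Sorterar ut de vanliga orden. Input:2st list Output:list
--
--     for i in range(len(vanligaorden)):
--         vanligaorden[i] = vanligaorden[i].rstrip('\n')
--
--     ovanligaord = []
--     for i in range(len(orden)):
--         if orden[i] not in vanligaorden and orden[i] not in ovanligaord:
--             ovanligaord.append(orden[i])
--
--     ovanligaord.sort()
--     return ovanligaord
-- ===== SOURCE B (Python) =====
-- def ordsortering(orden, vanligaorden):    # Sorterar ut de vanliga orden. Input:2st list Output:list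
--     for i in range(len(vanligaorden)):
--         vanligaorden[i] = vanligaorden[i].rstrip('\n')
--     # sort both lists once, then a single two-pointer merge scan:
--     # duplicates in xs are adjacent (skipped via prev), common words are
--     # found by advancing j instead of membership tests.
--     xs = sorted(orden)
--     ys = sorted(vanligaorden)
--     res = []
--     prev = None
--     i = j = 0
--     while i < len(xs):
--         if j < len(ys) and ys[j] < xs[i]:
--             j += 1
--         elif j < len(ys) and ys[j] == xs[i]:
--             i += 1
--         else:
--             if prev != xs[i]:
--                 res.append(xs[i])
--                 prev = xs[i]
--             i += 1
--     return res
-- ===== Notes on version B (the rewrite author's own statement) =====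
-- stated objective: faster
-- what changed: A's collection loop with two linear membership scans per word plus a final .sort() is replaced by sorting both lists once and running a single two-pointer merge scan: common words are skipped by advancing a pointer into the sorted common list, duplicates are skipped because they are adjacent after sorting.
import Mathlib
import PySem

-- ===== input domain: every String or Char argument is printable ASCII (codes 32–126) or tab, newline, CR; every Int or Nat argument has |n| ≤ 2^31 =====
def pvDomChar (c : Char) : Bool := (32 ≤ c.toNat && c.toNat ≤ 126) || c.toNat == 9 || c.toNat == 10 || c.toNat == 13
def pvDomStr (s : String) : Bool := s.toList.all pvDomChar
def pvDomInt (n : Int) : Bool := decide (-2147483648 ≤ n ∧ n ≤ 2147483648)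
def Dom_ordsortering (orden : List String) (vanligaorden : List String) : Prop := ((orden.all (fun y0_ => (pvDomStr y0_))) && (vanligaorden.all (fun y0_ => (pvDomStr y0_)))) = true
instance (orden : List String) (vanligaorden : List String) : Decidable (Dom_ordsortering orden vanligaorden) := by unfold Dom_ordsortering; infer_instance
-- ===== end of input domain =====

-- B sorts both lists once and replaces A's membership-scan collection loop by a two-pointer merge scan — faster;
-- both versions mutate the argument `vanligaorden` in place identically (the equivalence proved is about the return value).

-- shared helper: s.rstrip('\n') — strips ONLY '\n' from the right (PySem.Str.rstrip strips all whitespace, so this is ported by hand; exact for the single-char strip set)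
def rstripNewline (s : String) : String := String.ofList ((s.toList.reverse.dropWhile (fun c => c == '\n')).reverse)

-- ===== PORT A =====
def ordsortering (orden : List String) (vanligaorden : List String) : List String :=
  -- for i in range(len(vanligaorden)): vanligaorden[i] = vanligaorden[i].rstrip('\n')
  let vanligaorden := vanligaorden.map rstripNewline
  -- ovanligaord = []; for i in range(len(orden)): if orden[i] not in vanligaorden and orden[i] not in ovanligaord: ovanligaord.append(orden[i])
  let ovanligaord := orden.foldl
    (fun ovanligaord w =>
      if w ∉ vanligaorden ∧ w ∉ ovanligaord then ovanligaord ++ [w] else ovanligaord) []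
  -- ovanligaord.sort()
  PySem.List.sorted ovanligaord (fun x => x) false

-- ===== PORT B =====
-- the while loop of Source B: state (xs from i, ys from j, prev, res); branches in Source B's order
def mergeDiff : List String → List String → Option String → List String → List String
  | [], _, _, res => res
  | x :: xs, y :: ys, prev, res =>
      if y < x then mergeDiff (x :: xs) ys prev res                              -- ys[j] < xs[i]: j += 1
      else if y = x then mergeDiff xs (y :: ys) prev res                         -- ys[j] == xs[i]: i += 1
      else if prev ≠ some x then mergeDiff xs (y :: ys) (some x) (res ++ [x])    -- append, prev = xs[i]
      else mergeDiff xs (y :: ys) prev res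
  | x :: xs, [], prev, res =>
      if prev ≠ some x then mergeDiff xs [] (some x) (res ++ [x])
      else mergeDiff xs [] prev res
termination_by xs ys _ _ => xs.length + ys.length

def ordsortering_alt (orden : List String) (vanligaorden : List String) : List String :=
  let vanligaorden := vanligaorden.map rstripNewline
  let xs := PySem.List.sorted orden (fun x => x) false
  let ys := PySem.List.sorted vanligaorden (fun x => x) false
  mergeDiff xs ys none []

-- ===== PRECONDITION & SPEC =====
def Spec_ordsortering (orden : List String) (vanligaorden : List String) (out : List String) : Prop := out = ordsortering_alt orden vanligaorden
instance (orden : List String) (vanligaorden : List String) (out : List String) : Decidable (Spec_ordsortering orden vanligaorden out) := by unfold Spec_ordsortering; infer_instance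

-- ===== CLAIM (what is proved, stated in full; the proofs are below) =====
def Claim_equal_ordsortering : Prop := ∀ (orden : List String) (vanligaorden : List String), Dom_ordsortering orden vanligaorden → Spec_ordsortering orden vanligaorden (ordsortering orden vanligaorden)

-- ===== LEMMAS AND PROOFS =====

-- A's collection loop is set(add)-folding the words not in `v`
lemma foldl_collect_eq_ofList_filter (orden v : List String) :
    orden.foldl (fun acc w => if w ∉ v ∧ w ∉ acc then acc ++ [w] else acc) []
      = PySem.Set.ofList (orden.filter (fun w => !decide (w ∈ v))) := by
  suffices h : ∀ (l acc : List String),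
      l.foldl (fun acc w => if w ∉ v ∧ w ∉ acc then acc ++ [w] else acc) acc
        = (l.filter (fun w => !decide (w ∈ v))).foldl PySem.Set.add acc by
    rw [h, PySem.Set.ofList_eq_foldl]
  intro l
  induction l with
  | nil => intro acc; rfl
  | cons w t ih =>
    intro acc
    by_cases hv : w ∈ v
    · simp [hv, ih]
    · by_cases ha : w ∈ acc
      · simp [hv, ha, ih]
      · simp [hv, ha, ih]

-- the merge scan on sorted inputs: result is res ++ r where r is strictly increasing,
-- holds exactly the words of xs not in ys and ≠ prev, and all its words exceed prev
lemma mergeDiff_main (n : Nat) : ∀ (xs ys : List String) (prev : Option String) (res : List String),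
    xs.length + ys.length ≤ n →
    xs.Pairwise (· ≤ ·) → ys.Pairwise (· ≤ ·) →
    (∀ a ∈ xs, ∀ p ∈ prev, p ≤ a) →
    ∃ r, mergeDiff xs ys prev res = res ++ r ∧ r.Pairwise (· < ·) ∧
      (∀ a, a ∈ r ↔ a ∈ xs ∧ a ∉ ys ∧ prev ≠ some a) ∧
      (∀ a ∈ r, ∀ p ∈ prev, p < a) := by
  induction n with
  | zero =>
    intro xs ys prev res hn _ _ _
    match xs with
    | [] => exact ⟨[], by simp [mergeDiff]⟩
    | x :: xs => simp at hn
  | succ n ih =>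
    intro xs ys prev res hn hxs hys hprev
    match xs, ys with
    | [], ys => exact ⟨[], by simp [mergeDiff]⟩
    | x :: xs, y :: ys =>
      rw [List.pairwise_cons] at hxs hys
      have hxa : ∀ a ∈ x :: xs, x ≤ a := fun a ha => by
        rcases List.mem_cons.mp ha with h | h
        · exact le_of_eq h.symm
        · exact hxs.1 a h
      by_cases h1 : y < x
      · -- j += 1
        obtain ⟨r, he, hp, hm, hb⟩ := ih (x :: xs) ys prev res (by simp at hn ⊢; omega)
          (List.pairwise_cons.mpr hxs) hys.2 hprev
        refine ⟨r, by rw [mergeDiff]; simp only [if_pos h1]; exact he, hp, fun a => ?_, hb⟩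
        rw [hm]
        constructor
        · rintro ⟨ha, hay, hpa⟩
          refine ⟨ha, ?_, hpa⟩
          intro hc
          rcases List.mem_cons.mp hc with h | h
          · subst h; exact absurd (lt_of_lt_of_le h1 (hxa a ha)) (lt_irrefl a)
          · exact hay h
        · rintro ⟨ha, hay, hpa⟩
          exact ⟨ha, fun hc => hay (List.mem_cons_of_mem y hc), hpa⟩
      · by_cases h2 : y = x
        · -- common word: i += 1
          subst h2
          obtain ⟨r, he, hp, hm, hb⟩ := ih xs (y :: ys) prev res (by simp at hn ⊢; omega)
            hxs.2 (List.pairwise_cons.mpr hys) (fun a ha => hprev a (List.mem_cons_of_mem y ha))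
          refine ⟨r, by rw [mergeDiff]; simp only [lt_irrefl, if_false, if_pos rfl]; exact he,
            hp, fun a => ?_, hb⟩
          rw [hm]
          constructor
          · rintro ⟨ha, hay, hpa⟩
            exact ⟨List.mem_cons_of_mem y ha, hay, hpa⟩
          · rintro ⟨ha, hay, hpa⟩
            rcases List.mem_cons.mp ha with h | h
            · exact absurd (h ▸ List.mem_cons_self) hay
            · exact ⟨h, hay, hpa⟩
        · -- x < y: x not in remaining ys
          have hxy : x < y := lt_of_le_of_ne (le_of_not_gt h1) (Ne.symm h2)
          have hxnotin : x ∉ y :: ys := by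
            intro hc
            rcases List.mem_cons.mp hc with h | h
            · exact h2 h.symm
            · exact absurd (lt_of_lt_of_le hxy (hys.1 x h)) (lt_irrefl x)
          by_cases h3 : prev = some x
          · -- duplicate of last output: skip
            obtain ⟨r, he, hp, hm, hb⟩ := ih xs (y :: ys) prev res (by simp at hn ⊢; omega)
              hxs.2 (List.pairwise_cons.mpr hys) (fun a ha => hprev a (List.mem_cons_of_mem x ha))
            have heq : mergeDiff (x :: xs) (y :: ys) prev res = res ++ r := by
              rw [mergeDiff]
              simp only [if_neg h1, if_neg h2, h3, ne_eq, not_true_eq_false, if_false]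
              rw [h3] at he; exact he
            refine ⟨r, heq, hp, fun a => ?_, hb⟩
            rw [hm]
            constructor
            · rintro ⟨ha, hay, hpa⟩
              exact ⟨List.mem_cons_of_mem x ha, hay, hpa⟩
            · rintro ⟨ha, hay, hpa⟩
              rcases List.mem_cons.mp ha with h | h
              · exact absurd h3 (h ▸ hpa)
              · exact ⟨h, hay, hpa⟩
          · -- output x
            obtain ⟨r, he, hp, hm, hb⟩ := ih xs (y :: ys) (some x) (res ++ [x]) (by simp at hn ⊢; omega)
              hxs.2 (List.pairwise_cons.mpr hys)
              (fun a ha p hpmem => by rw [Option.mem_some_iff] at hpmem; exact hpmem ▸ hxs.1 a ha)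
            have hlt : ∀ a ∈ r, x < a := fun a ha => hb a ha x (Option.mem_some_iff.mpr rfl)
            have heq : mergeDiff (x :: xs) (y :: ys) prev res = res ++ x :: r := by
              rw [mergeDiff]
              simp only [if_neg h1, if_neg h2, ne_eq, h3, not_false_eq_true, if_true]
              rw [he]; simp
            refine ⟨x :: r, heq, ?_, fun a => ?_, ?_⟩
            · exact List.pairwise_cons.mpr ⟨hlt, hp⟩
            · constructor
              · intro ha
                rcases List.mem_cons.mp ha with h | h
                · exact ⟨List.mem_cons.mpr (Or.inl h), h ▸ hxnotin, h ▸ h3⟩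
                · obtain ⟨ha', hay, hpa⟩ := (hm a).mp h
                  refine ⟨List.mem_cons_of_mem x ha', hay, ?_⟩
                  intro hc
                  have hpx : a ≤ x := hprev x List.mem_cons_self a (by simp [hc])
                  exact absurd (lt_of_le_of_lt hpx (hlt a h)) (lt_irrefl a)
              · rintro ⟨ha, hay, hpa⟩
                rcases List.mem_cons.mp ha with h | h
                · exact h ▸ List.mem_cons_self
                · by_cases hax : a = x
                  · exact hax ▸ List.mem_cons_self
                  · exact List.mem_cons_of_mem x ((hm a).mpr
                      ⟨h, hay, fun hc => hax (Option.some_injective _ hc).symm⟩)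
            · intro a ha p hpmem
              have hpx : p ≤ x := hprev x List.mem_cons_self p hpmem
              have hpnex : p ≠ x := fun hc => h3 (by rw [Option.mem_def] at hpmem; rw [hpmem, hc])
              have hplt : p < x := lt_of_le_of_ne hpx hpnex
              rcases List.mem_cons.mp ha with h | h
              · exact h ▸ hplt
              · exact lt_trans hplt (hlt a h)
    | x :: xs, [] =>
      rw [List.pairwise_cons] at hxs
      by_cases h3 : prev = some x
      · obtain ⟨r, he, hp, hm, hb⟩ := ih xs [] prev res (by simp at hn ⊢; omega)
          hxs.2 List.Pairwise.nil (fun a ha => hprev a (List.mem_cons_of_mem x ha))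
        have heq : mergeDiff (x :: xs) [] prev res = res ++ r := by
          rw [mergeDiff]
          simp only [ne_eq, h3, not_true_eq_false, if_false]
          rw [h3] at he; exact he
        refine ⟨r, heq, hp, fun a => ?_, hb⟩
        rw [hm]
        constructor
        · rintro ⟨ha, hay, hpa⟩
          exact ⟨List.mem_cons_of_mem x ha, hay, hpa⟩
        · rintro ⟨ha, hay, hpa⟩
          rcases List.mem_cons.mp ha with h | h
          · exact absurd h3 (h ▸ hpa)
          · exact ⟨h, hay, hpa⟩
      · obtain ⟨r, he, hp, hm, hb⟩ := ih xs [] (some x) (res ++ [x]) (by simp at hn ⊢; omega)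
          hxs.2 List.Pairwise.nil
          (fun a ha p hpmem => by rw [Option.mem_some_iff] at hpmem; exact hpmem ▸ hxs.1 a ha)
        have hlt : ∀ a ∈ r, x < a := fun a ha => hb a ha x (Option.mem_some_iff.mpr rfl)
        have heq : mergeDiff (x :: xs) [] prev res = res ++ x :: r := by
          rw [mergeDiff]
          simp only [ne_eq, h3, not_false_eq_true, if_true]
          rw [he]; simp
        refine ⟨x :: r, heq, ?_, fun a => ?_, ?_⟩
        · exact List.pairwise_cons.mpr ⟨hlt, hp⟩
        · constructor
          · intro ha
            rcases List.mem_cons.mp ha with h | h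
            · exact ⟨List.mem_cons.mpr (Or.inl h), by simp, h ▸ h3⟩
            · obtain ⟨ha', hay, hpa⟩ := (hm a).mp h
              refine ⟨List.mem_cons_of_mem x ha', hay, ?_⟩
              intro hc
              have hpx : a ≤ x := hprev x List.mem_cons_self a (by simp [hc])
              exact absurd (lt_of_le_of_lt hpx (hlt a h)) (lt_irrefl a)
          · rintro ⟨ha, hay, hpa⟩
            rcases List.mem_cons.mp ha with h | h
            · exact h ▸ List.mem_cons_self
            · by_cases hax : a = x
              · exact hax ▸ List.mem_cons_self
              · exact List.mem_cons_of_mem x ((hm a).mpr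
                  ⟨h, hay, fun hc => hax (Option.some_injective _ hc).symm⟩)
        · intro a ha p hpmem
          have hpx : p ≤ x := hprev x List.mem_cons_self p hpmem
          have hpnex : p ≠ x := fun hc => h3 (by rw [Option.mem_def] at hpmem; rw [hpmem, hc])
          have hplt : p < x := lt_of_le_of_ne hpx hpnex
          rcases List.mem_cons.mp ha with h | h
          · exact h ▸ hplt
          · exact lt_trans hplt (hlt a h)

-- ===== VERDICT (by name: the statement is the Claim_ definition above) =====
theorem ordsortering_spec : Claim_equal_ordsortering := by
  intro orden vanligaorden _
  show _ = _
  unfold ordsortering ordsortering_alt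
  simp only []
  rw [foldl_collect_eq_ofList_filter]
  set v := vanligaorden.map rstripNewline with hv
  set xs := PySem.List.sorted orden (fun x => x) false with hxs
  set ys := PySem.List.sorted v (fun x => x) false with hys
  obtain ⟨r, he, hp, hm, _⟩ := mergeDiff_main (xs.length + ys.length) xs ys none []
    le_rfl (by simpa using PySem.List.sorted_pairwise orden (fun x => x))
    (by simpa using PySem.List.sorted_pairwise v (fun x => x)) (by simp)
  rw [he, List.nil_append]
  have hmem : ∀ a, a ∈ r ↔ a ∈ orden ∧ a ∉ v := by
    intro a
    rw [hm a]
    simp [hxs, hys, PySem.List.mem_sorted]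
  have hrnodup : r.Nodup := hp.imp ne_of_lt
  apply PySem.List.sorted_id_eq_of_perm_of_pairwise
  · rw [List.perm_ext_iff_of_nodup hrnodup (PySem.Set.nodup_ofList _)]
    intro a
    rw [hmem a, PySem.Set.mem_ofList, List.mem_filter]
    simp
  · exact hp.imp le_of_lt
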